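-- pv_equiv track=rewrite | github.com/lucywalter4061/AdventCode2023 | day1_partb.py | get_positions_of_numbers
-- ===== SOURCE A (Python) =====
-- def get_position_of_lowest_digit(line):
--     for i in range(len(line)):
--         if line[i].isdigit():
--             return i
--     return len(line)+1
--
-- def get_position_of_highest_digit(line):
--     highest_digit = -1
--     for i in range(len(line)):
--         if line[i].isdigit():
--             if i > highest_digit:
--                 highest_digit = i
--     return highest_digit
--
-- def get_positions_of_numbers(line):
--     lowest = get_position_of_lowest_digit(line)
--     highest = get_position_of_highest_digit(line)
--     numbers = ["one", "two", "three", "four", "five", "six", "seven", "eight", "nine", "ten"]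
--
--     for word_number in numbers:
--         if line.rfind(word_number) < lowest and line.find(word_number) != -1:
--             lowest = line.rfind(word_number)
--         if line.find(word_number) < lowest and line.find(word_number) != -1:
--             lowest = line.find(word_number)
--         if line.find(word_number) > highest:
--             highest = line.find(word_number)
--         if line.rfind(word_number) > highest:
--             highest = line.rfind(word_number)
--     return [lowest, highest]
-- ===== SOURCE B (Python) =====
-- WORDS = ("one", "two", "three", "four", "five", "six", "seven", "eight", "nine", "ten")
--
-- def get_positions_of_numbers(line):
--     lowest = len(line) + 1
--     highest = -1
--     for i in range(len(line)):
--         if line[i].isdigit() or any(line.startswith(w, i) for w in WORDS):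
--             if lowest == len(line) + 1:
--                 lowest = i
--             highest = i
--     return [lowest, highest]
-- ===== Notes on version B (the rewrite author's own statement) =====
-- stated objective: simpler
-- what changed: Replaces the two digit-scan helpers plus a 10-word loop of find/rfind string searches (with a four-if update chain) by a single left-to-right pass over the indices that records the first and last index where a digit or a number word starts.
import Mathlib
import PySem

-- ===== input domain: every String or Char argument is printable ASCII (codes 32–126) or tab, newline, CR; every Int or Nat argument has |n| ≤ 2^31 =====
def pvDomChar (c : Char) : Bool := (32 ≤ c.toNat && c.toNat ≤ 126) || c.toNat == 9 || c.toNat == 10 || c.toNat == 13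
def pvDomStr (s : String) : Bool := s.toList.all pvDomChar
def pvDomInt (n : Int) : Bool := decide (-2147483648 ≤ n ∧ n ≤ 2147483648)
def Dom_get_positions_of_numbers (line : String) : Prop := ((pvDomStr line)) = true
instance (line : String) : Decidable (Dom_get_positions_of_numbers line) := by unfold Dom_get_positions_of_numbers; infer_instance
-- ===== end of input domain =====

-- B replaces A's digit scans plus per-word find/rfind searches by one left-to-right pass
-- recording the first and last index where a digit or a number word starts (objective: simpler).

-- ===== PORT A =====
def lowDigitGo (l : List Char) (i : Nat) : Int :=
  if i < l.length then
    if PySem.Chars.isdigit (l.getD i ' ') then (i : Int) else lowDigitGo l (i + 1)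
  else (l.length : Int) + 1
termination_by l.length - i

def get_position_of_lowest_digit (line : String) : Int :=
  lowDigitGo line.toList 0

def highDigitGo (l : List Char) (i : Nat) (h : Int) : Int :=
  if i < l.length then
    highDigitGo l (i + 1)
      (if PySem.Chars.isdigit (l.getD i ' ') then (if (i : Int) > h then (i : Int) else h) else h)
  else h
termination_by l.length - i

def get_position_of_highest_digit (line : String) : Int :=
  highDigitGo line.toList 0 (-1)

def get_positions_of_numbers (line : String) : List Int :=
  let lowest := get_position_of_lowest_digit line
  let highest := get_position_of_highest_digit line
  let numbers : List String := ["one", "two", "three", "four", "five", "six", "seven", "eight", "nine", "ten"]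
  let st := numbers.foldl (fun (st : Int × Int) w =>
    let lo := st.1
    let hi := st.2
    let lo := if PySem.Str.rfind line w < lo ∧ PySem.Str.find line w ≠ -1 then PySem.Str.rfind line w else lo
    let lo := if PySem.Str.find line w < lo ∧ PySem.Str.find line w ≠ -1 then PySem.Str.find line w else lo
    let hi := if PySem.Str.find line w > hi then PySem.Str.find line w else hi
    let hi := if PySem.Str.rfind line w > hi then PySem.Str.rfind line w else hi
    (lo, hi)) (lowest, highest)
  [st.1, st.2]

-- ===== PORT B =====
def pyWordsB : List String := ["one", "two", "three", "four", "five", "six", "seven", "eight", "nine", "ten"]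

-- line[i].isdigit() or line.startswith(w, i) for some word w (i always in range here)
def bMatch (l : List Char) (i : Nat) : Bool :=
  PySem.Chars.isdigit (l.getD i ' ') || pyWordsB.any (fun w => PySem.Chars.startswith (l.drop i) w.toList)

def get_positions_of_numbers_alt (line : String) : List Int :=
  let l := line.toList
  let n := l.length
  let st := (List.range n).foldl (fun (st : Int × Int) i =>
    if bMatch l i then
      ((if st.1 = (n : Int) + 1 then (i : Int) else st.1), (i : Int))
    else st) (((n : Int) + 1), -1)
  [st.1, st.2]

-- ===== PRECONDITION & SPEC =====
def Spec_get_positions_of_numbers (line : String) (out : List Int) : Prop := out = get_positions_of_numbers_alt line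
instance (line : String) (out : List Int) : Decidable (Spec_get_positions_of_numbers line out) := by unfold Spec_get_positions_of_numbers; infer_instance

-- ===== CLAIM (what is proved, stated in full; the proofs are below) =====
def Claim_equal_get_positions_of_numbers : Prop := ∀ (line : String), Dom_get_positions_of_numbers line → Spec_get_positions_of_numbers line (get_positions_of_numbers line)

-- ===== LEMMAS AND PROOFS =====

-- v is the least index < bound satisfying q (dflt if none)
def SpecLow (q : Nat → Bool) (bound : Nat) (dflt : Int) (v : Int) : Prop :=
  (v = dflt ∧ ∀ i < bound, q i = false) ∨
  (∃ m, m < bound ∧ q m = true ∧ v = (m : Int) ∧ ∀ j < m, q j = false)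

-- v is the greatest index < bound satisfying q (dflt if none)
def SpecHigh (q : Nat → Bool) (bound : Nat) (dflt : Int) (v : Int) : Prop :=
  (v = dflt ∧ ∀ i < bound, q i = false) ∨
  (∃ m, m < bound ∧ q m = true ∧ v = (m : Int) ∧ ∀ j, m < j → j < bound → q j = false)

def qDigit (l : List Char) (i : Nat) : Bool := PySem.Chars.isdigit (l.getD i ' ')
def qPref (l : List Char) (w : List Char) (i : Nat) : Bool := w.isPrefixOf (l.drop i)

theorem SpecLow_unique {q : Nat → Bool} {bound : Nat} {dflt v v' : Int}
    (h : SpecLow q bound dflt v) (h' : SpecLow q bound dflt v') : v = v' := by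
  rcases h with ⟨hv, hno⟩ | ⟨m, hm, hq, hv, hmin⟩ <;>
    rcases h' with ⟨hv', hno'⟩ | ⟨m', hm', hq', hv', hmin'⟩
  · omega
  · exact absurd hq' (by simp [hno _ hm'])
  · exact absurd hq (by simp [hno' _ hm])
  · rcases Nat.lt_trichotomy m m' with h | h | h
    · exact absurd hq (by simp [hmin' _ h])
    · omega
    · exact absurd hq' (by simp [hmin _ h])

theorem SpecHigh_unique {q : Nat → Bool} {bound : Nat} {dflt v v' : Int}
    (h : SpecHigh q bound dflt v) (h' : SpecHigh q bound dflt v') : v = v' := by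
  rcases h with ⟨hv, hno⟩ | ⟨m, hm, hq, hv, hmax⟩ <;>
    rcases h' with ⟨hv', hno'⟩ | ⟨m', hm', hq', hv', hmax'⟩
  · omega
  · exact absurd hq' (by simp [hno _ hm'])
  · exact absurd hq (by simp [hno' _ hm])
  · rcases Nat.lt_trichotomy m m' with h | h | h
    · exact absurd hq' (by simp [hmax _ h hm'])
    · omega
    · exact absurd hq (by simp [hmax' _ h hm])

theorem SpecLow_congr {q q' : Nat → Bool} {bound : Nat} {dflt v : Int}
    (hq : ∀ i, q i = q' i) (h : SpecLow q bound dflt v) : SpecLow q' bound dflt v := by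
  simpa [SpecLow, hq] using h

theorem SpecHigh_congr {q q' : Nat → Bool} {bound : Nat} {dflt v : Int}
    (hq : ∀ i, q i = q' i) (h : SpecHigh q bound dflt v) : SpecHigh q' bound dflt v := by
  simpa [SpecHigh, hq] using h

-- digit-scan helpers of A
theorem lowDigitGo_none (l : List Char) (i : Nat)
    (h : ∀ j, i ≤ j → j < l.length → qDigit l j = false) :
    lowDigitGo l i = (l.length : Int) + 1 := by
  rw [lowDigitGo]
  split
  · rename_i hi
    rw [if_neg (by simpa [qDigit] using h i le_rfl hi)]
    exact lowDigitGo_none l (i + 1) (fun j hj hj' => h j (by omega) hj')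
  · rfl
termination_by l.length - i

theorem lowDigitGo_some (l : List Char) (i m : Nat)
    (him : i ≤ m) (hm : m < l.length) (hq : qDigit l m = true)
    (hmin : ∀ j, i ≤ j → j < m → qDigit l j = false) :
    lowDigitGo l i = (m : Int) := by
  rw [lowDigitGo, if_pos (by omega)]
  rcases eq_or_lt_of_le him with rfl | him'
  · rw [if_pos (by simpa [qDigit] using hq)]
  · rw [if_neg (by simpa [qDigit] using hmin i le_rfl him')]
    exact lowDigitGo_some l (i + 1) m (by omega) hm hq (fun j hj hj' => hmin j (by omega) hj')
termination_by l.length - i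

theorem highDigitGo_none (l : List Char) (i : Nat) (h : Int)
    (hno : ∀ j, i ≤ j → j < l.length → qDigit l j = false) :
    highDigitGo l i h = h := by
  rw [highDigitGo]
  split
  · rename_i hi
    rw [if_neg (by simpa [qDigit] using hno i le_rfl hi)]
    exact highDigitGo_none l (i + 1) h (fun j hj hj' => hno j (by omega) hj')
  · rfl
termination_by l.length - i

theorem highDigitGo_some (l : List Char) (i m : Nat) (h : Int)
    (him : i ≤ m) (hm : m < l.length) (hq : qDigit l m = true)
    (hmax : ∀ j, m < j → j < l.length → qDigit l j = false) (hh : h < (m : Int)) :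
    highDigitGo l i h = (m : Int) := by
  rw [highDigitGo, if_pos (by omega)]
  rcases eq_or_lt_of_le him with rfl | him'
  · rw [if_pos (by simpa [qDigit] using hq), if_pos hh]
    exact highDigitGo_none l (i + 1) _ (fun j hj hj' => hmax j (by omega) hj')
  · have hrec : ∀ h' : Int, h' < (m : Int) →
        highDigitGo l (i + 1) h' = (m : Int) := fun h' hh' =>
      highDigitGo_some l (i + 1) m h' (by omega) hm hq hmax hh'
    split
    · split
      · exact hrec _ (by exact_mod_cast him')
      · exact hrec _ hh
    · exact hrec _ hh
termination_by l.length - i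

-- from an existence statement produce the least / greatest witness
theorem exists_min {q : Nat → Bool} {bound : Nat} (h : ∃ i, i < bound ∧ q i = true) :
    ∃ m, m < bound ∧ q m = true ∧ ∀ j < m, q j = false := by
  classical
  have hex : ∃ i, i < bound ∧ q i = true := h
  refine ⟨Nat.find hex, (Nat.find_spec hex).1, (Nat.find_spec hex).2, fun j hj => ?_⟩
  have := Nat.find_min hex hj
  have hjb : j < bound := lt_trans hj (Nat.find_spec hex).1
  simpa [hjb] using this

theorem exists_max {q : Nat → Bool} {bound : Nat} (h : ∃ i, i < bound ∧ q i = true) :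
    ∃ m, m < bound ∧ q m = true ∧ ∀ j, m < j → j < bound → q j = false := by
  classical
  obtain ⟨i, hi, hqi⟩ := h
  have h' : ∃ k, k < bound ∧ (bound - 1 - k) < bound ∧ q (bound - 1 - k) = true :=
    ⟨bound - 1 - i, by omega, by omega, by rwa [show bound - 1 - (bound - 1 - i) = i by omega]⟩
  have hex : ∃ k, k < bound ∧ (bound - 1 - k) < bound ∧ q (bound - 1 - k) = true := h'
  have hspec := Nat.find_spec hex
  set k := Nat.find hex with hkdef
  have hk : k < bound := hspec.1
  refine ⟨bound - 1 - k, hspec.2.1, hspec.2.2, fun j hj hjb => ?_⟩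
  by_contra hq
  have hq' : q j = true := by simpa using hq
  have hlt : bound - 1 - j < k := by omega
  have := Nat.find_min hex hlt
  simp only [not_and] at this
  have := this (by omega) (by omega)
  rw [show bound - 1 - (bound - 1 - j) = j by omega] at this
  exact this hq'

theorem lowDigit_spec (l : List Char) :
    SpecLow (qDigit l) l.length ((l.length : Int) + 1) (lowDigitGo l 0) := by
  by_cases h : ∃ i, i < l.length ∧ qDigit l i = true
  · obtain ⟨m, hm, hq, hmin⟩ := exists_min h
    exact Or.inr ⟨m, hm, hq, lowDigitGo_some l 0 m (Nat.zero_le _) hm hq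
      (fun j _ hj => hmin j hj), hmin⟩
  · simp only [not_exists, not_and] at h
    have hno : ∀ j, 0 ≤ j → j < l.length → qDigit l j = false := by
      intro j _ hj
      simpa using h j hj
    exact Or.inl ⟨lowDigitGo_none l 0 hno, fun i hi => hno i (Nat.zero_le _) hi⟩

theorem highDigit_spec (l : List Char) :
    SpecHigh (qDigit l) l.length (-1) (highDigitGo l 0 (-1)) := by
  by_cases h : ∃ i, i < l.length ∧ qDigit l i = true
  · obtain ⟨m, hm, hq, hmax⟩ := exists_max h
    exact Or.inr ⟨m, hm, hq, highDigitGo_some l 0 m (-1) (Nat.zero_le _) hm hq hmax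
      (by omega), hmax⟩
  · simp only [not_exists, not_and] at h
    have hno : ∀ j, 0 ≤ j → j < l.length → qDigit l j = false := by
      intro j _ hj
      simpa using h j hj
    exact Or.inl ⟨highDigitGo_none l 0 (-1) hno, fun i hi => hno i (Nat.zero_le _) hi⟩

-- find / rfind of a nonempty word
theorem qPref_true {l w : List Char} {i : Nat} (h : w <+: l.drop i) : qPref l w i = true := by
  simpa [qPref, List.isPrefixOf_iff_prefix] using h

theorem qPref_false {l w : List Char} {i : Nat} (h : ¬ w <+: l.drop i) : qPref l w i = false := by
  rw [qPref, Bool.eq_false_iff]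
  simpa [List.isPrefixOf_iff_prefix] using h

theorem find_specLow (l w : List Char) (hw : w ≠ []) :
    SpecLow (qPref l w) l.length (-1) (PySem.Chars.find l w) := by
  by_cases hin : w <:+: l
  · have hpos : 0 ≤ PySem.Chars.find l w := (PySem.Chars.find_nonneg_iff l w).mpr hin
    obtain ⟨hpref, hmin⟩ := PySem.Chars.find_spec hpos
    set k := (PySem.Chars.find l w).toNat with hk
    have hkl : (k : Int) ≤ l.length := by
      have := PySem.Chars.find_le_length l w
      omega
    have hklt : k < l.length := by
      rcases lt_or_eq_of_le hkl with h | h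
      · exact_mod_cast h
      · exfalso
        apply hw
        have : k = l.length := by exact_mod_cast h
        rw [this, List.drop_length] at hpref
        exact List.prefix_nil.mp hpref
    refine Or.inr ⟨k, hklt, qPref_true hpref, by omega, fun j hj => qPref_false (hmin j hj)⟩
  · have hne : PySem.Chars.find l w = -1 := (PySem.Chars.find_eq_neg_one_iff l w).mpr hin
    refine Or.inl ⟨hne, fun i _ => qPref_false fun hp => ?_⟩
    exact hin ((PySem.Chars.isIn_iff_infix w l).mp
      ((PySem.Chars.exists_prefix_drop_iff_isIn w l).mp ⟨i, hp⟩))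

theorem SpecHigh_shrink {q : Nat → Bool} {b : Nat} {d v : Int}
    (h : SpecHigh q (b + 1) d v) (hq : q b = false) : SpecHigh q b d v := by
  rcases h with ⟨hv, hno⟩ | ⟨m, hm, hqm, hv, hmax⟩
  · exact Or.inl ⟨hv, fun i hi => hno i (by omega)⟩
  · have hmb : m ≠ b := fun h => by
      rw [h] at hqm
      simp [hq] at hqm
    exact Or.inr ⟨m, by omega, hqm, hv, fun k hk hk' => hmax k hk (by omega)⟩

theorem SpecLow_extend {q : Nat → Bool} {b : Nat} {d v : Int}
    (h : SpecLow q b d v) (hq : q b = false) : SpecLow q (b + 1) d v := by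
  rcases h with ⟨hv, hno⟩ | ⟨m, hm, hqm, hv, hmin⟩
  · refine Or.inl ⟨hv, fun i hi => ?_⟩
    rcases Nat.lt_or_ge i b with h | h
    · exact hno i h
    · rw [show i = b by omega]
      exact hq
  · exact Or.inr ⟨m, by omega, hqm, hv, hmin⟩

theorem SpecHigh_extend {q : Nat → Bool} {b : Nat} {d v : Int}
    (h : SpecHigh q b d v) (hq : q b = false) : SpecHigh q (b + 1) d v := by
  rcases h with ⟨hv, hno⟩ | ⟨m, hm, hqm, hv, hmax⟩
  · refine Or.inl ⟨hv, fun i hi => ?_⟩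
    rcases Nat.lt_or_ge i b with h | h
    · exact hno i h
    · rw [show i = b by omega]
      exact hq
  · refine Or.inr ⟨m, by omega, hqm, hv, fun k hk hk' => ?_⟩
    rcases Nat.lt_or_ge k b with h | h
    · exact hmax k hk h
    · rw [show k = b by omega]
      exact hq

theorem rfindGo_spec (l w : List Char) (j : Nat) :
    SpecHigh (qPref l w) (j + 1) (-1) (PySem.Chars.rfind.go l w j) := by
  induction j with
  | zero =>
    rw [PySem.Chars.rfind.go]
    by_cases h : w.isPrefixOf l
    · rw [if_pos h]
      exact Or.inr ⟨0, by omega, by simpa [qPref] using h, rfl, by omega⟩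
    · rw [if_neg h]
      refine Or.inl ⟨rfl, fun i hi => ?_⟩
      rw [show i = 0 by omega, qPref, Bool.eq_false_iff]
      simpa using h
  | succ j ih =>
    rw [PySem.Chars.rfind.go]
    by_cases h : w.isPrefixOf (l.drop (j + 1))
    · rw [if_pos h]
      exact Or.inr ⟨j + 1, by omega, by simpa [qPref] using h, rfl, by omega⟩
    · rw [if_neg h]
      refine SpecHigh_extend ih ?_
      rw [qPref, Bool.eq_false_iff]
      simpa using h

theorem rfind_specHigh (l w : List Char) (hw : w ≠ []) :
    SpecHigh (qPref l w) l.length (-1) (PySem.Chars.rfind l w) := by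
  have h := rfindGo_spec l w l.length
  refine SpecHigh_shrink (b := l.length) ?_ ?_
  · exact h
  · exact qPref_false (by simp [List.drop_length, List.prefix_nil, hw])

theorem find_le_rfind {q : Nat → Bool} {bound : Nat} {f r : Int}
    (hf : SpecLow q bound (-1) f) (hr : SpecHigh q bound (-1) r) :
    f ≤ r ∧ (f = -1 → r = -1) := by
  rcases hf with ⟨hv, hno⟩ | ⟨m, hm, hq, hv, hmin⟩ <;>
    rcases hr with ⟨hv', hno'⟩ | ⟨M, hM, hq', hv', hmax⟩
  · omega
  · exact absurd hq' (by simp [hno _ hM])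
  · exact absurd hq (by simp [hno' _ hm])
  · have : ¬ M < m := fun hlt => absurd hq' (by simp [hmin _ hlt])
    constructor
    · omega
    · intro h
      omega

-- net effect of one word's four-if update chain
theorem mergeLow {q1 q2 : Nat → Bool} {n : Nat} {lo f r : Int}
    (h1 : SpecLow q1 n ((n : Int) + 1) lo)
    (h2 : SpecLow q2 n (-1) f) (h2r : SpecHigh q2 n (-1) r) :
    (if f < (if r < lo ∧ f ≠ -1 then r else lo) ∧ f ≠ -1 then f
     else (if r < lo ∧ f ≠ -1 then r else lo)) = (if f ≠ -1 ∧ f < lo then f else lo) ∧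
    SpecLow (fun i => q1 i || q2 i) n ((n : Int) + 1) (if f ≠ -1 ∧ f < lo then f else lo) := by
  obtain ⟨hfr, hfr1⟩ := find_le_rfind h2 h2r
  constructor
  · rcases h2 with ⟨hv, -⟩ | ⟨m2, hm2, -, hv, -⟩
    · have hf1 : f = -1 := hv
      split_ifs <;> omega
    · have h0 : (0 : Int) ≤ f := by omega
      split_ifs <;> omega
  · rcases h1 with ⟨hv1, hno1⟩ | ⟨m1, hm1, hq1, hv1, hmin1⟩ <;>
      rcases h2 with ⟨hv2, hno2⟩ | ⟨m2, hm2, hq2, hv2, hmin2⟩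
    · rw [if_neg (by omega)]
      exact Or.inl ⟨hv1, fun i hi => by simp [hno1 _ hi, hno2 _ hi]⟩
    · rw [if_pos ⟨by omega, by omega⟩]
      exact Or.inr ⟨m2, hm2, by simp [hq2], hv2,
        fun j hj => by simp [hno1 _ (lt_trans hj hm2), hmin2 _ hj]⟩
    · rw [if_neg (by omega)]
      exact Or.inr ⟨m1, hm1, by simp [hq1], hv1,
        fun j hj => by simp [hmin1 _ hj, hno2 _ (lt_trans hj hm1)]⟩
    · by_cases hlt : m2 < m1
      · rw [if_pos ⟨by omega, by omega⟩]
        exact Or.inr ⟨m2, hm2, by simp [hq2], hv2,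
          fun j hj => by simp [hmin1 _ (lt_trans hj hlt), hmin2 _ hj]⟩
      · have hng : ¬ (f ≠ -1 ∧ f < lo) := by
          rintro ⟨-, hlt'⟩
          omega
        rw [if_neg hng]
        refine Or.inr ⟨m1, hm1, by simp [hq1], hv1, fun j hj => ?_⟩
        simp [hmin1 j hj, hmin2 j (by omega)]

theorem mergeHigh {q1 q2 : Nat → Bool} {n : Nat} {hi f r : Int}
    (h1 : SpecHigh q1 n (-1) hi)
    (h2 : SpecLow q2 n (-1) f) (h2r : SpecHigh q2 n (-1) r) :
    (if r > (if f > hi then f else hi) then r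
     else (if f > hi then f else hi)) = (if r > hi then r else hi) ∧
    SpecHigh (fun i => q1 i || q2 i) n (-1) (if r > hi then r else hi) := by
  obtain ⟨hfr, hfr1⟩ := find_le_rfind h2 h2r
  constructor
  · rcases h1 with ⟨hv, -⟩ | ⟨m1, hm1, -, hv, -⟩ <;>
      [skip; skip] <;> first
    | (have hhi : hi = -1 := hv; split_ifs <;> omega)
    | (have hhi : ∃ m : Nat, hi = (m : Int) := ⟨m1, hv⟩; obtain ⟨m, hm⟩ := hhi;
       split_ifs <;> omega)
  · rcases h1 with ⟨hv1, hno1⟩ | ⟨M1, hM1, hq1, hv1, hmax1⟩ <;>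
      rcases h2r with ⟨hv2, hno2⟩ | ⟨M2, hM2, hq2, hv2, hmax2⟩
    · rw [if_neg (by omega)]
      exact Or.inl ⟨hv1, fun i hi => by simp [hno1 _ hi, hno2 _ hi]⟩
    · rw [if_pos (by omega)]
      exact Or.inr ⟨M2, hM2, by simp [hq2], hv2,
        fun j hj hjn => by simp [hno1 _ hjn, hmax2 _ hj hjn]⟩
    · rw [if_neg (by omega)]
      exact Or.inr ⟨M1, hM1, by simp [hq1], hv1,
        fun j hj hjn => by simp [hmax1 _ hj hjn, hno2 _ hjn]⟩
    · by_cases hlt : M1 < M2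
      · rw [if_pos (by omega)]
        exact Or.inr ⟨M2, hM2, by simp [hq2], hv2,
          fun j hj hjn => by simp [hmax1 _ (lt_trans hlt hj) hjn, hmax2 _ hj hjn]⟩
      · rw [if_neg (by omega)]
        refine Or.inr ⟨M1, hM1, by simp [hq1], hv1, fun j hj hjn => ?_⟩
        simp [hmax1 _ hj hjn, hmax2 _ (by omega) hjn]

-- A's word fold: each word merges its find/rfind into the running extrema
theorem foldWords_spec (line : String) (ws : List String)
    (hws : ∀ w ∈ ws, w.toList ≠ []) (q0 : Nat → Bool) (lo hi : Int)
    (hlo : SpecLow q0 line.toList.length ((line.toList.length : Int) + 1) lo)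
    (hhi : SpecHigh q0 line.toList.length (-1) hi) :
    SpecLow (fun i => q0 i || ws.any (fun w => qPref line.toList w.toList i))
      line.toList.length ((line.toList.length : Int) + 1)
      (ws.foldl (fun (st : Int × Int) w =>
        let lo := st.1
        let hi := st.2
        let lo := if PySem.Str.rfind line w < lo ∧ PySem.Str.find line w ≠ -1 then PySem.Str.rfind line w else lo
        let lo := if PySem.Str.find line w < lo ∧ PySem.Str.find line w ≠ -1 then PySem.Str.find line w else lo
        let hi := if PySem.Str.find line w > hi then PySem.Str.find line w else hi
        let hi := if PySem.Str.rfind line w > hi then PySem.Str.rfind line w else hi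
        (lo, hi)) (lo, hi)).1 ∧
    SpecHigh (fun i => q0 i || ws.any (fun w => qPref line.toList w.toList i))
      line.toList.length (-1)
      (ws.foldl (fun (st : Int × Int) w =>
        let lo := st.1
        let hi := st.2
        let lo := if PySem.Str.rfind line w < lo ∧ PySem.Str.find line w ≠ -1 then PySem.Str.rfind line w else lo
        let lo := if PySem.Str.find line w < lo ∧ PySem.Str.find line w ≠ -1 then PySem.Str.find line w else lo
        let hi := if PySem.Str.find line w > hi then PySem.Str.find line w else hi
        let hi := if PySem.Str.rfind line w > hi then PySem.Str.rfind line w else hi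
        (lo, hi)) (lo, hi)).2 := by
  induction ws generalizing q0 lo hi with
  | nil =>
    constructor
    · exact SpecLow_congr (fun i => by simp) hlo
    · exact SpecHigh_congr (fun i => by simp) hhi
  | cons w ws ih =>
    have hw : w.toList ≠ [] := hws w (by simp)
    have hf : PySem.Str.find line w = PySem.Chars.find line.toList w.toList := rfl
    have hr : PySem.Str.rfind line w = PySem.Chars.rfind line.toList w.toList := rfl
    have h2 := find_specLow line.toList w.toList hw
    have h2r := rfind_specHigh line.toList w.toList hw
    obtain ⟨heqlo, hlo'⟩ := mergeLow hlo h2 h2r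
    obtain ⟨heqhi, hhi'⟩ := mergeHigh hhi h2 h2r
    rw [List.foldl_cons]
    simp only [hf, hr]
    rw [heqlo, heqhi]
    have := ih (fun w hw' => hws w (by simp [hw'])) _ _ _ hlo' hhi'
    constructor
    · refine SpecLow_congr (fun i => ?_) this.1
      simp [Bool.or_assoc]
    · refine SpecHigh_congr (fun i => ?_) this.2
      simp [Bool.or_assoc]

-- B's fold
theorem bFold_spec (l : List Char) (k : Nat) (hk : k ≤ l.length) :
    SpecLow (bMatch l) k ((l.length : Int) + 1)
      ((List.range k).foldl (fun (st : Int × Int) i =>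
        if bMatch l i then
          ((if st.1 = (l.length : Int) + 1 then (i : Int) else st.1), (i : Int))
        else st) (((l.length : Int) + 1), -1)).1 ∧
    SpecHigh (bMatch l) k (-1)
      ((List.range k).foldl (fun (st : Int × Int) i =>
        if bMatch l i then
          ((if st.1 = (l.length : Int) + 1 then (i : Int) else st.1), (i : Int))
        else st) (((l.length : Int) + 1), -1)).2 := by
  induction k with
  | zero => exact ⟨Or.inl ⟨rfl, by omega⟩, Or.inl ⟨rfl, by omega⟩⟩
  | succ k ih =>
    have hk' : k ≤ l.length := by omega
    obtain ⟨ihl, ihh⟩ := ih hk'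
    rw [List.range_succ, List.foldl_append, List.foldl_cons, List.foldl_nil]
    set st := (List.range k).foldl (fun (st : Int × Int) i =>
      if bMatch l i then
        ((if st.1 = (l.length : Int) + 1 then (i : Int) else st.1), (i : Int))
      else st) (((l.length : Int) + 1), -1) with hst
    by_cases hb : bMatch l k = true
    · rw [if_pos hb]
      constructor
      · rcases ihl with ⟨hv, hno⟩ | ⟨m, hm, hq, hv, hmin⟩
        · rw [hv, if_pos rfl]
          exact Or.inr ⟨k, by omega, hb, rfl, fun j hj => hno j hj⟩
        · rw [if_neg (by rw [hv]; intro h; omega)]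
          exact Or.inr ⟨m, by omega, hq, hv, hmin⟩
      · exact Or.inr ⟨k, by omega, hb, rfl, by omega⟩
    · rw [if_neg hb]
      have hb' : bMatch l k = false := by simpa using hb
      exact ⟨SpecLow_extend ihl hb', SpecHigh_extend ihh hb'⟩

-- ===== VERDICT (by name: the statement is the Claim_ definition above) =====
theorem get_positions_of_numbers_spec : Claim_equal_get_positions_of_numbers := by
  intro line _hd
  unfold Spec_get_positions_of_numbers
  have hwords : ∀ w ∈ (["one", "two", "three", "four", "five", "six", "seven", "eight", "nine", "ten"] : List String), w.toList ≠ [] := by decide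
  have hA := foldWords_spec line (["one", "two", "three", "four", "five", "six", "seven", "eight", "nine", "ten"] : List String) hwords (qDigit line.toList)
    (get_position_of_lowest_digit line) (get_position_of_highest_digit line)
    (lowDigit_spec line.toList) (highDigit_spec line.toList)
  have hB := bFold_spec line.toList line.toList.length le_rfl
  have hpred : ∀ i, (qDigit line.toList i ||
      ((["one", "two", "three", "four", "five", "six", "seven", "eight", "nine", "ten"] : List String)).any (fun w => qPref line.toList w.toList i)) = bMatch line.toList i := by
    intro i
    rfl
  have hAl := SpecLow_congr hpred hA.1
  have hAh := SpecHigh_congr hpred hA.2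
  have e1 := SpecLow_unique hAl hB.1
  have e2 := SpecHigh_unique hAh hB.2
  unfold get_positions_of_numbers get_positions_of_numbers_alt
  simp only []
  rw [e1, e2]
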